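-- pv_equiv track=rewrite | github.com/irishakeks/Crypto | Hill.py | multiplication_matrix
-- ===== SOURCE A (Python) =====
-- def multiplication_matrix(m1, m2):
--     m3 = []
--     s = 0
--     t = []
--     for j in range(0, len(m2[0])):
--         for i in range(0, len(m1)):
--             s = s + m1[i] * m2[i][j]
--         m3.append(s % 37)
--         s = 0
--
--     return m3
-- ===== SOURCE B (Python) =====
-- def multiplication_matrix(m1, m2):
--     acc = [0] * len(m2[0])
--     for i, x in enumerate(m1):
--         acc = [a + x * m2[i][j] for j, a in enumerate(acc)]
--     return [a % 37 for a in acc]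
-- ===== Notes on version B (the rewrite author's own statement) =====
-- stated objective: alternative
-- what changed: Replaces the column-major double loop with a scalar accumulator by a row-major gaxpy sweep that updates a whole partial-sum vector per input coordinate and takes the mod in one final pass.
import Mathlib
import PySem

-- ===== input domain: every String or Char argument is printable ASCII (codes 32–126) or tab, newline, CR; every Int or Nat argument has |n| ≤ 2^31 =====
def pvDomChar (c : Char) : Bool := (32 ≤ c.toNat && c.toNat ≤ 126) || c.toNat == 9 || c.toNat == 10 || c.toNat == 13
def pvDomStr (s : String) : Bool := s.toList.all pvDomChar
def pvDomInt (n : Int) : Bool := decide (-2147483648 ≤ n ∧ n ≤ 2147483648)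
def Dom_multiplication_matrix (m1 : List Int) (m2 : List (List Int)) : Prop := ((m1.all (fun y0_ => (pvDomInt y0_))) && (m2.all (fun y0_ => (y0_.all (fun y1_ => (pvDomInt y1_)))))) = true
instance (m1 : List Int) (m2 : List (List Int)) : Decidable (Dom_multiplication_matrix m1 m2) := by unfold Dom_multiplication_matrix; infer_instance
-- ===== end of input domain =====

-- B computes the same mod-37 vector-matrix product by a row-major gaxpy sweep
-- (vector of partial sums, single final mod pass) instead of A's column-major
-- scalar-accumulator loops; same cost, different decomposition.

-- ===== PORT A =====
def multiplication_matrix (m1 : List Int) (m2 : List (List Int)) : List Int :=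
  -- m3 = []; s = 0; for j in range(len(m2[0])): for i in range(len(m1)): s += m1[i]*m2[i][j]; m3.append(s % 37); s = 0
  ((PySem.List.pyRange 0 ((PySem.List.pyGetD m2 0 []).length : Int) 1).foldl
    (fun (st : List Int × Int) (j : Int) =>
      let s := (PySem.List.pyRange 0 ((m1.length : Int)) 1).foldl
        (fun s i => s + PySem.List.pyGetD m1 i 0 * PySem.List.pyGetD (PySem.List.pyGetD m2 i []) j 0) st.2
      (st.1 ++ [PySem.Int.mod s 37], 0))
    ([], 0)).1

-- ===== PORT B =====
def multiplication_matrix_alt (m1 : List Int) (m2 : List (List Int)) : List Int :=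
  -- acc = [0]*len(m2[0]); for i, x in enumerate(m1): acc = [a + x*m2[i][j] for j, a in enumerate(acc)]; return [a % 37 for a in acc]
  ((PySem.List.enumerate m1 0).foldl
    (fun (acc : List Int) (p : Int × Int) =>
      (PySem.List.enumerate acc 0).map
        (fun q => q.2 + p.2 * PySem.List.pyGetD (PySem.List.pyGetD m2 p.1 []) q.1 0))
    (List.replicate (PySem.List.pyGetD m2 0 []).length 0)).map
    (fun a => PySem.Int.mod a 37)

-- ===== PRECONDITION & SPEC =====
-- Pre_ excludes exactly the inputs where the Python A raises IndexError: m2 empty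
-- (m2[0]), or — when the first row is nonempty — m1 longer than m2, or one of the
-- first len(m1) rows shorter than the first row.
def Pre_multiplication_matrix (m1 : List Int) (m2 : List (List Int)) : Prop :=
  m2 ≠ [] ∧ ((m2.headD []).length = 0 ∨
    (m1.length ≤ m2.length ∧ ∀ row ∈ m2.take m1.length, (m2.headD []).length ≤ row.length))
instance (m1 : List Int) (m2 : List (List Int)) : Decidable (Pre_multiplication_matrix m1 m2) := by
  unfold Pre_multiplication_matrix; infer_instance
def pvWitness_multiplication_matrix : List Int × List (List Int) := ([1, 2], [[1, 2], [3, 4]])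

def Spec_multiplication_matrix (m1 : List Int) (m2 : List (List Int)) (out : List Int) : Prop := out = multiplication_matrix_alt m1 m2
instance (m1 : List Int) (m2 : List (List Int)) (out : List Int) : Decidable (Spec_multiplication_matrix m1 m2 out) := by unfold Spec_multiplication_matrix; infer_instance

-- ===== CLAIM (what is proved, stated in full; the proofs are below) =====
def Claim_equal_multiplication_matrix : Prop := ∀ (m1 : List Int) (m2 : List (List Int)), Dom_multiplication_matrix m1 m2 → Pre_multiplication_matrix m1 m2 → Spec_multiplication_matrix m1 m2 (multiplication_matrix m1 m2)

-- ===== LEMMAS AND PROOFS =====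

-- w m2 i j = m2[i][j] with defaults; shared abbreviation for the proofs.
def pvW (m2 : List (List Int)) (i j : Int) : Int :=
  PySem.List.pyGetD (PySem.List.pyGetD m2 i []) j 0

-- A's outer loop, characterised: the state's scalar is always reset to 0, so the
-- result is the initial list extended by one completed column sum per j.
theorem pvA_fold (m1 : List Int) (m2 : List (List Int)) (js : List Int) (acc : List Int) :
    (js.foldl
      (fun (st : List Int × Int) (j : Int) =>
        (st.1 ++ [PySem.Int.mod
          ((PySem.List.pyRange 0 ((m1.length : Int)) 1).foldl
            (fun s i => s + PySem.List.pyGetD m1 i 0 * pvW m2 i j) st.2) 37], 0))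
      (acc, 0)).1
    = acc ++ js.map (fun j => PySem.Int.mod
        ((PySem.List.pyRange 0 ((m1.length : Int)) 1).foldl
          (fun s i => s + PySem.List.pyGetD m1 i 0 * pvW m2 i j) 0) 37) := by
  induction js generalizing acc with
  | nil => simp
  | cons j js ih =>
    rw [List.foldl_cons, ih]
    simp

-- Mapping an index-aware function over an enumerated list, written over range.
theorem pvEnum_map (l : List Int) (F : Int → Int → Int) (G : Nat → Int)
    (hG : ∀ (k : Nat) (hk : k < l.length), F (k : Int) l[k] = G k) :
    (PySem.List.enumerate l 0).map (fun q => F q.1 q.2)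
      = (List.range l.length).map G := by
  apply List.ext_getElem
  · simp [PySem.List.length_enumerate]
  · intro k h1 h2
    simp [PySem.List.getElem_enumerate] at h1 ⊢
    exact hG k (by simpa [PySem.List.length_enumerate] using h1)

-- B's fold, characterised: starting from (range n).map g, after consuming the
-- enumerated tail the j-th entry is g j plus the accumulated partial sums.
theorem pvB_fold (m2 : List (List Int)) (n : Nat) :
    ∀ (l : List Int) (s : Int) (g : Nat → Int),
    ((PySem.List.enumerate l s).foldl
      (fun (acc : List Int) (p : Int × Int) =>
        (PySem.List.enumerate acc 0).map
          (fun q => q.2 + p.2 * pvW m2 p.1 q.1))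
      ((List.range n).map g))
    = (List.range n).map (fun (j : Nat) =>
        (PySem.List.enumerate l s).foldl
          (fun t p => t + p.2 * pvW m2 p.1 ((j : Nat) : Int)) (g j)) := by
  intro l
  induction l with
  | nil => intro s g; simp [PySem.List.enumerate_nil]
  | cons x xs ih =>
    intro s g
    rw [PySem.List.enumerate_cons]
    simp only [List.foldl_cons]
    have hmap : (PySem.List.enumerate ((List.range n).map g) 0).map
        (fun q => q.2 + x * pvW m2 s q.1)
        = (List.range n).map (fun (j : Nat) => g j + x * pvW m2 s ((j : Nat) : Int)) := by
      rw [pvEnum_map ((List.range n).map g) (fun i v => v + x * pvW m2 s i)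
            (fun (j : Nat) => g j + x * pvW m2 s ((j : Nat) : Int))]
      · simp
      · intro k hk
        simp
    rw [hmap, ih (s + 1) (fun (j : Nat) => g j + x * pvW m2 s ((j : Nat) : Int))]

-- A's inner fold over the index range equals B's fold over the enumerated vector.
theorem pvInner_eq (m1 : List Int) (m2 : List (List Int)) (j : Int) :
    (PySem.List.pyRange 0 ((m1.length : Int)) 1).foldl
        (fun s i => s + PySem.List.pyGetD m1 i 0 * pvW m2 i j) 0
      = (PySem.List.enumerate m1 0).foldl (fun t p => t + p.2 * pvW m2 p.1 j) 0 := by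
  rw [PySem.List.enumerate_eq_map_pyRange m1 (0 : Int), List.foldl_map]
  simp [PySem.List.len]

-- ===== VERDICT (by name: the statement is the Claim_ definition above) =====
theorem multiplication_matrix_spec : Claim_equal_multiplication_matrix := by
  intro m1 m2 _ _
  show multiplication_matrix m1 m2 = multiplication_matrix_alt m1 m2
  unfold multiplication_matrix multiplication_matrix_alt
  dsimp only
  rw [show (List.replicate (PySem.List.pyGetD m2 0 []).length (0 : Int))
        = (List.range (PySem.List.pyGetD m2 0 []).length).map (fun _ => (0 : Int)) by simp]
  have hB := pvB_fold m2 (PySem.List.pyGetD m2 0 []).length m1 0 (fun _ => (0 : Int))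
  simp only [pvW] at hB
  rw [hB]
  have hA := pvA_fold m1 m2 (PySem.List.pyRange 0 ((PySem.List.pyGetD m2 0 []).length : Int) 1) []
  simp only [pvW] at hA
  rw [hA]
  rw [PySem.List.pyRange_zero_nat (PySem.List.pyGetD m2 0 []).length]
  simp only [List.map_map, List.nil_append]
  apply List.map_congr_left
  intro k _
  have hinner := pvInner_eq m1 m2 ((k : Nat) : Int)
  simp only [pvW] at hinner
  simp only [Function.comp]
  rw [hinner]
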